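-- pv_equiv track=rewrite | github.com/yuxinliuhubert/Porter | finalSystem/def min_substitutions_for_unique_adjacen.py | min_substitutions_for_unique_adjacent_chars
-- ===== SOURCE A (Python) =====
-- def min_substitutions_for_unique_adjacent_chars(words):
--     # Function to calculate minimum changes for a single word
--     def min_changes(word):
--         changes = 0
--         for i in range(1, len(word)):
--             if word[i] == word[i-1]:
--                 changes += 1
--         return changes
--
--     # Calculate and return the minimum changes for each word in the input list
--     return [min_changes(word) for word in words]
-- ===== SOURCE B (Python) =====
-- def min_substitutions_for_unique_adjacent_chars(words):
--     # Divide and conquer: the number of equal-adjacent pairs wholly inside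
--     # w[lo:hi] equals the pairs inside the left half plus the pairs inside
--     # the right half plus the one pair straddling the split point.
--     def cnt(w, lo, hi):
--         if hi - lo < 2:
--             return 0
--         mid = (lo + hi) // 2
--         return cnt(w, lo, mid) + cnt(w, mid, hi) + (1 if w[mid - 1] == w[mid] else 0)
--
--     return [cnt(w, 0, len(w)) for w in words]
-- ===== Notes on version B (the rewrite author's own statement) =====
-- stated objective: alternative
-- what changed: B counts the equal-adjacent pairs of each word by divide and conquer on index intervals (pairs in [lo,hi) = pairs in left half + pairs in right half + the straddling pair at the midpoint), instead of A's left-to-right index loop comparing word[i] with word[i-1].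
import Mathlib
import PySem

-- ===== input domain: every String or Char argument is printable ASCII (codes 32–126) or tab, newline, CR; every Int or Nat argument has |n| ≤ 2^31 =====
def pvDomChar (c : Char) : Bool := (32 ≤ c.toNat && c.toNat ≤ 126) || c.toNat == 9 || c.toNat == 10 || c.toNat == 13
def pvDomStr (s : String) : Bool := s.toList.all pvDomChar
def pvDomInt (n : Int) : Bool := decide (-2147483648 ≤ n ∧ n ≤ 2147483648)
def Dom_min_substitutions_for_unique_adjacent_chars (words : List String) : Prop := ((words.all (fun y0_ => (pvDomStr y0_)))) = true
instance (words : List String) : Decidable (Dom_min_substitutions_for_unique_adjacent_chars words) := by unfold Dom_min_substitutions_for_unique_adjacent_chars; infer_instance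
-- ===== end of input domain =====

-- B counts equal-adjacent pairs per word by divide and conquer on index intervals
-- instead of A's left-to-right index loop; same behaviour, alternative algorithm.


-- ===== PORT A =====
-- A's nested helper: changes = 0; for i in range(1, len(word)): if word[i] == word[i-1]: changes += 1
def pvMinChangesA (word : String) : Int :=
  (PySem.List.pyRange 1 (word.toList.length : Int) 1).foldl
    (fun changes i =>
      if PySem.List.pyGetD word.toList i ' ' = PySem.List.pyGetD word.toList (i - 1) ' '
      then changes + 1 else changes)
    0

def min_substitutions_for_unique_adjacent_chars (words : List String) : List Int :=
  words.map pvMinChangesA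

-- ===== PORT B =====
-- B's recursive helper cnt(w, lo, hi); lo, hi are always in 0..len(w) so Nat indices and
-- Nat division for (lo+hi)//2 and List.getD for in-range w[mid-1], w[mid] are exact here.
def pvCntB (cs : List Char) (lo hi : Nat) : Int :=
  if hi - lo < 2 then 0
  else
    let mid := (lo + hi) / 2
    pvCntB cs lo mid + pvCntB cs mid hi +
      (if cs.getD (mid - 1) ' ' = cs.getD mid ' ' then 1 else 0)
  termination_by hi - lo
  decreasing_by all_goals omega

def min_substitutions_for_unique_adjacent_chars_alt (words : List String) : List Int :=
  words.map (fun w => pvCntB w.toList 0 w.toList.length)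

-- ===== PRECONDITION & SPEC =====
def Spec_min_substitutions_for_unique_adjacent_chars (words : List String) (out : List Int) : Prop := out = min_substitutions_for_unique_adjacent_chars_alt words
instance (words : List String) (out : List Int) : Decidable (Spec_min_substitutions_for_unique_adjacent_chars words out) := by unfold Spec_min_substitutions_for_unique_adjacent_chars; infer_instance

-- ===== CLAIM =====
def Claim_equal_min_substitutions_for_unique_adjacent_chars : Prop := ∀ (words : List String), Dom_min_substitutions_for_unique_adjacent_chars words → Spec_min_substitutions_for_unique_adjacent_chars words (min_substitutions_for_unique_adjacent_chars words)

-- ===== LEMMAS AND PROOFS =====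

-- indicator of an equal-adjacent pair at position i (compares cs[i] with cs[i-1])
def pvInd (cs : List Char) (i : Nat) : Int :=
  if cs.getD i ' ' = cs.getD (i - 1) ' ' then 1 else 0

theorem pvCntB_eq_sum (cs : List Char) (lo hi : Nat) :
    pvCntB cs lo hi = ∑ i ∈ Finset.Ico (lo + 1) hi, pvInd cs i := by
  fun_induction pvCntB cs lo hi with
  | case1 lo hi h =>
    rw [Finset.Ico_eq_empty (by omega)]; simp
  | case2 lo hi h mid ih1 ih2 =>
    rw [ih1, ih2]
    have hmid : mid = (lo + hi) / 2 := rfl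
    have hm1 : lo + 1 ≤ mid := by omega
    have hm2 : mid ≤ hi := by omega
    have hlt : mid < hi := by omega
    rw [← Finset.sum_Ico_consecutive (fun i => pvInd cs i) hm1 hm2,
        Finset.sum_eq_sum_Ico_succ_bot hlt]
    unfold pvInd
    by_cases hc : cs.getD (mid - 1) ' ' = cs.getD mid ' '
    · rw [if_pos hc, if_pos hc.symm]; ring
    · rw [if_neg hc, if_neg (fun e => hc e.symm)]; ring

theorem pvFoldA_eq_sum (cs : List Char) (n : Nat) (acc : Int) :
    (PySem.List.pyRange 1 (n : Int) 1).foldl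
      (fun changes i =>
        if PySem.List.pyGetD cs i ' ' = PySem.List.pyGetD cs (i - 1) ' '
        then changes + 1 else changes) acc
    = acc + ∑ i ∈ Finset.Ico 1 n, pvInd cs i := by
  induction n generalizing acc with
  | zero => rw [PySem.List.pyRange_one_eq_nil (by omega)]; simp
  | succ n ih =>
    rcases Nat.eq_zero_or_pos n with hn | hn
    · subst hn
      rw [show ((1 : Nat) : Int) = (1 : Int) by norm_num] at *
      rw [PySem.List.pyRange_one_eq_nil (by omega)]
      simp
    · have hcast : ((n + 1 : Nat) : Int) = (n : Int) + 1 := by push_cast; ring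
      rw [hcast, PySem.List.pyRange_one_succ_right (by omega), List.foldl_append, ih]
      simp only [List.foldl_cons, List.foldl_nil]
      have h1 : PySem.List.pyGetD cs (n : Int) ' ' = cs.getD n ' ' := by
        rw [PySem.List.pyGetD_natCast]
      have h2 : PySem.List.pyGetD cs ((n : Int) - 1) ' ' = cs.getD (n - 1) ' ' := by
        rw [show ((n : Int) - 1) = ((n - 1 : Nat) : Int) by omega, PySem.List.pyGetD_natCast]
      rw [h1, h2, Finset.sum_Ico_succ_top hn]
      unfold pvInd
      split_ifs <;> ring

theorem pvMinChanges_eq (w : String) :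
    pvMinChangesA w = pvCntB w.toList 0 w.toList.length := by
  unfold pvMinChangesA
  rw [pvFoldA_eq_sum, pvCntB_eq_sum]
  simp

-- ===== VERDICT =====
theorem min_substitutions_for_unique_adjacent_chars_spec : Claim_equal_min_substitutions_for_unique_adjacent_chars := by
  intro words _
  unfold Spec_min_substitutions_for_unique_adjacent_chars
  unfold min_substitutions_for_unique_adjacent_chars min_substitutions_for_unique_adjacent_chars_alt
  exact List.map_congr_left (fun w _ => pvMinChanges_eq w)
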